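-- pv_equiv track=rewrite | github.com/segevstein-dotcom/project | scripts/verify_simulation_accuracy.py | stage1_statistics_C
-- ===== SOURCE A (Python) =====
-- def dynamic_compress_C(x):
--     """Direct translation from C code"""
--     if x >= 64:
--         compressed = x >> 4
--         shift = 1
--     else:
--         compressed = x >> 2
--         shift = 0
--     if compressed > 15:
--         compressed = 15
--     return compressed, shift
--
-- def find_min_alpha_C(alphas):
--     """Direct translation from C code"""
--     min_alpha = 127
--     for i in range(len(alphas)):
--         if alphas[i] < min_alpha:
--             min_alpha = alphas[i]
--     return min_alpha
--
-- def stage1_statistics_C(quantized_values, zero_points, alpha_factors, SQUARE_LUT):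
--     """Direct translation from C code"""
--     num_channels = len(quantized_values)
--     min_alpha = find_min_alpha_C(alpha_factors)
--     Ex = 0
--     Ex2 = 0
--
--     for i in range(num_channels):
--         zp = zero_points[i]
--         input_val = quantized_values[i]
--
--         # 1. Center (line 54)
--         xi = int(input_val) - int(zp)
--
--         # 2. Compress & Square (lines 57-60)
--         abs_xi = abs(xi)
--         compressed, shift = dynamic_compress_C(abs_xi)
--         xc_sq = SQUARE_LUT[compressed] << (4 * shift)
--
--         # 3. Global Scale Logic (lines 63-67)
--         alpha = alpha_factors[i]
--         relative_shift = alpha - min_alpha  # Always >= 0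
--
--         ex_contribution = xi << relative_shift
--         ex2_contribution = xc_sq << (2 * relative_shift)
--
--         # 4. Accumulate (lines 70-71)
--         Ex += ex_contribution
--         Ex2 += ex2_contribution
--
--     return Ex, Ex2, min_alpha
-- ===== SOURCE B (Python) =====
-- def stage1_statistics_C(quantized_values, zero_points, alpha_factors, SQUARE_LUT):
--     """Group channels by alpha exponent: one dict pass of per-alpha partial sums,
--     then a single shift per distinct alpha when totalling (127 seeds the min as
--     the exponent cap of the int8 scheme)."""
--     groups = {}
--     for x, zp, alpha in zip(quantized_values, zero_points, alpha_factors):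
--         xi = x - zp
--         ax = abs(xi)
--         if ax >= 64:
--             sq = SQUARE_LUT[min(ax >> 4, 15)] << 4
--         else:
--             sq = SQUARE_LUT[min(ax >> 2, 15)]
--         s, s2 = groups.get(alpha, (0, 0))
--         groups[alpha] = (s + xi, s2 + sq)
--     min_alpha = min([127, *alpha_factors])
--     Ex = sum(s << (alpha - min_alpha) for alpha, (s, _) in groups.items())
--     Ex2 = sum(s2 << (2 * (alpha - min_alpha)) for alpha, (_, s2) in groups.items())
--     return Ex, Ex2, min_alpha
-- ===== Notes on version B (the rewrite author's own statement) =====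
-- stated objective: alternative
-- what changed: B buckets channels by their alpha exponent into a dict of per-alpha partial sums (xi and squared term) in one pass, then forms Ex/Ex2 with a single shift per distinct alpha over the dict items, instead of A's separate min pass followed by shifting every channel's contribution individually.
import Mathlib
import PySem

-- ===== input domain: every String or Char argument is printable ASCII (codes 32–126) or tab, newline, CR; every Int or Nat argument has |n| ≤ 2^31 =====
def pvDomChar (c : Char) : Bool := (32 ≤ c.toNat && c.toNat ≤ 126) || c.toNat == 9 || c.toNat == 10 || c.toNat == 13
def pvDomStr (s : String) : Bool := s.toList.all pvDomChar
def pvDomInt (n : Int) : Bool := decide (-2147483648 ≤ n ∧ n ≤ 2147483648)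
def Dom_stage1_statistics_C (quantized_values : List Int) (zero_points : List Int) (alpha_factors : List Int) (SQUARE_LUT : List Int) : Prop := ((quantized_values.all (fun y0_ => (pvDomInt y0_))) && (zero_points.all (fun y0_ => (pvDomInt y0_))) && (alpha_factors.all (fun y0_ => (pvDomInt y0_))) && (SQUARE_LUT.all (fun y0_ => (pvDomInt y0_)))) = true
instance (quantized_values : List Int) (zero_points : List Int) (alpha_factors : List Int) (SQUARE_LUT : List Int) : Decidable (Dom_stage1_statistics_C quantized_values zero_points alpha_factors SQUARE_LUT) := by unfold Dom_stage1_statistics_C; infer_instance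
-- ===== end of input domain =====

-- B groups channels by their alpha exponent into a dict of per-alpha partial sums and applies
-- one shift per distinct alpha when totalling, instead of A's separate min pass followed by a
-- per-channel shift (objective: alternative algorithm, same cost).

-- ===== PORT A =====
def dynamic_compress_C (x : Int) : Int × Int :=
  let cs : Int × Int := if x ≥ 64 then (x >>> (4 : Nat), 1) else (x >>> (2 : Nat), 0)
  let compressed := if cs.1 > 15 then (15 : Int) else cs.1
  (compressed, cs.2)

def find_min_alpha_C (alphas : List Int) : Int :=
  alphas.foldl (fun min_alpha a => if a < min_alpha then a else min_alpha) 127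

-- List reads are ported with getD and the LUT index / shift amounts with .toNat: under
-- Pre_ every index is in range and every shift amount is provably nonnegative (Python
-- raises exactly on the inputs Pre_ excludes).
def stage1_statistics_C (quantized_values : List Int) (zero_points : List Int) (alpha_factors : List Int) (SQUARE_LUT : List Int) : Int × Int × Int :=
  let num_channels := quantized_values.length
  let min_alpha := find_min_alpha_C alpha_factors
  let r :=
    (List.range num_channels).foldl (fun (s : Int × Int) (i : Nat) =>
      let zp := zero_points.getD i 0
      let input_val := quantized_values.getD i 0
      let xi := input_val - zp
      let abs_xi := |xi|
      let cs := dynamic_compress_C abs_xi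
      let xc_sq := SQUARE_LUT.getD cs.1.toNat 0 <<< (4 * cs.2).toNat
      let alpha := alpha_factors.getD i 0
      let relative_shift := alpha - min_alpha
      let ex_contribution := xi <<< relative_shift.toNat
      let ex2_contribution := xc_sq <<< (2 * relative_shift).toNat
      (s.1 + ex_contribution, s.2 + ex2_contribution)) (0, 0)
  (r.1, r.2, min_alpha)

-- ===== PORT B =====
-- groups.get(alpha, (0,0)) / groups[alpha] = … is PySem.Dict getD/insert; min([127, *a]) is
-- PySem.List.minD on the cons list; the two generator sums are sums over groups.items.
def stage1_statistics_C_alt (quantized_values : List Int) (zero_points : List Int) (alpha_factors : List Int) (SQUARE_LUT : List Int) : Int × Int × Int :=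
  let groups := (quantized_values.zip (zero_points.zip alpha_factors)).foldl
    (fun (d : PySem.Dict Int (Int × Int)) (t : Int × Int × Int) =>
      let xi := t.1 - t.2.1
      let ax := |xi|
      let sq := if ax ≥ 64
        then SQUARE_LUT.getD (min (ax >>> (4 : Nat)) 15).toNat 0 <<< (4 : Nat)
        else SQUARE_LUT.getD (min (ax >>> (2 : Nat)) 15).toNat 0
      let g := d.getD t.2.2 (0, 0)
      d.insert t.2.2 (g.1 + xi, g.2 + sq)) PySem.Dict.empty
  let min_alpha := PySem.List.minD ((127 : Int) :: alpha_factors) (fun x => x) 0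
  let Ex := (groups.items.map (fun (p : Int × (Int × Int)) => p.2.1 <<< (p.1 - min_alpha).toNat)).sum
  let Ex2 := (groups.items.map (fun (p : Int × (Int × Int)) => p.2.2 <<< (2 * (p.1 - min_alpha)).toNat)).sum
  (Ex, Ex2, min_alpha)

-- ===== PRECONDITION & SPEC =====
def pvCompIdx (xi : Int) : Int :=
  if |xi| ≥ 64 then min (|xi| >>> (4 : Nat)) 15 else min (|xi| >>> (2 : Nat)) 15

-- Pre_ excludes exactly the inputs where Python A raises IndexError: zero_points or
-- alpha_factors shorter than quantized_values, or SQUARE_LUT too short for some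
-- channel's compressed index.
def Pre_stage1_statistics_C (quantized_values : List Int) (zero_points : List Int) (alpha_factors : List Int) (SQUARE_LUT : List Int) : Prop :=
  quantized_values.length ≤ zero_points.length ∧
  quantized_values.length ≤ alpha_factors.length ∧
  ∀ i < quantized_values.length,
    (pvCompIdx (quantized_values.getD i 0 - zero_points.getD i 0)).toNat < SQUARE_LUT.length

instance (quantized_values : List Int) (zero_points : List Int) (alpha_factors : List Int) (SQUARE_LUT : List Int) : Decidable (Pre_stage1_statistics_C quantized_values zero_points alpha_factors SQUARE_LUT) := by unfold Pre_stage1_statistics_C; infer_instance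

def pvWitness_stage1_statistics_C : List Int × List Int × List Int × List Int := ([0], [0], [0], [1])

def Spec_stage1_statistics_C (quantized_values : List Int) (zero_points : List Int) (alpha_factors : List Int) (SQUARE_LUT : List Int) (out : Int × Int × Int) : Prop := out = stage1_statistics_C_alt quantized_values zero_points alpha_factors SQUARE_LUT
instance (quantized_values : List Int) (zero_points : List Int) (alpha_factors : List Int) (SQUARE_LUT : List Int) (out : Int × Int × Int) : Decidable (Spec_stage1_statistics_C quantized_values zero_points alpha_factors SQUARE_LUT out) := by unfold Spec_stage1_statistics_C; infer_instance

-- ===== CLAIM (what is proved, stated in full; the proofs are below) =====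
def Claim_equal_stage1_statistics_C : Prop := ∀ (quantized_values : List Int) (zero_points : List Int) (alpha_factors : List Int) (SQUARE_LUT : List Int), Dom_stage1_statistics_C quantized_values zero_points alpha_factors SQUARE_LUT → Pre_stage1_statistics_C quantized_values zero_points alpha_factors SQUARE_LUT → Spec_stage1_statistics_C quantized_values zero_points alpha_factors SQUARE_LUT (stage1_statistics_C quantized_values zero_points alpha_factors SQUARE_LUT)

-- ===== LEMMAS AND PROOFS =====

-- A's per-channel loop body, abstracted over the triple t = (x, zp, alpha)
def fA (LUT : List Int) (m : Int) (s : Int × Int) (t : Int × Int × Int) : Int × Int :=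
  let xi := t.1 - t.2.1
  let cs := dynamic_compress_C |xi|
  let xc_sq := LUT.getD cs.1.toNat 0 <<< (4 * cs.2).toNat
  let rs := t.2.2 - m
  (s.1 + xi <<< rs.toNat, s.2 + xc_sq <<< (2 * rs).toNat)

-- B's grouping loop body and its per-channel increment
def stepB (LUT : List Int) (d : PySem.Dict Int (Int × Int)) (t : Int × Int × Int) : PySem.Dict Int (Int × Int) :=
  let xi := t.1 - t.2.1
  let ax := |xi|
  let sq := if ax ≥ 64
    then LUT.getD (min (ax >>> (4 : Nat)) 15).toNat 0 <<< (4 : Nat)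
    else LUT.getD (min (ax >>> (2 : Nat)) 15).toNat 0
  let g := d.getD t.2.2 (0, 0)
  d.insert t.2.2 (g.1 + xi, g.2 + sq)

def sqB (LUT : List Int) (t : Int × Int × Int) : Int :=
  let ax := |t.1 - t.2.1|
  if ax ≥ 64
    then LUT.getD (min (ax >>> (4 : Nat)) 15).toNat 0 <<< (4 : Nat)
    else LUT.getD (min (ax >>> (2 : Nat)) 15).toNat 0

lemma foldl_if_min (l : List Int) (c : Int) :
    l.foldl (fun m a => if a < m then a else m) c = l.foldl min c := by
  have h : (fun (m a : Int) => if a < m then a else m) = min := by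
    funext m a
    simp only [min_def]
    split_ifs <;> omega
  rw [h]

lemma min_agree (a : List Int) :
    PySem.List.minD ((127 : Int) :: a) (fun x => x) 0 = find_min_alpha_C a := by
  unfold find_min_alpha_C
  rw [foldl_if_min]
  simp [PySem.List.minD, PySem.List.min?_id_cons]

-- index loop over getD ↔ fold over the zipped triples
lemma foldl_range_getD_zip {σ : Type} (f : σ → Int × Int × Int → σ) :
    ∀ (q z a : List Int) (s : σ), q.length ≤ z.length → q.length ≤ a.length →
    (List.range q.length).foldl (fun s i => f s (q.getD i 0, z.getD i 0, a.getD i 0)) s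
      = (q.zip (z.zip a)).foldl f s := by
  intro q
  induction q with
  | nil => intro z a s _ _; simp
  | cons x qt ih =>
    intro z a s hz ha
    match z, a with
    | [], _ => simp at hz
    | _ :: _, [] => simp at ha
    | zh :: zt, ah :: at' =>
      simp only [List.length_cons, List.range_succ_eq_map, List.foldl_cons, List.foldl_map,
        List.getD_cons_zero, List.getD_cons_succ, List.zip_cons_cons]
      exact ih zt at' (f s (x, zh, ah)) (by simpa using hz) (by simpa using ha)

-- B's quantize-and-square agrees with A's dynamic_compress + LUT lookup
lemma sq_agree (LUT : List Int) (x : Int) :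
    (if x ≥ 64 then (LUT.getD (min (x >>> (4 : Nat)) 15).toNat 0 <<< (4 : Nat))
     else (LUT.getD (min (x >>> (2 : Nat)) 15).toNat 0))
    = LUT.getD (dynamic_compress_C x).1.toNat 0 <<< (4 * (dynamic_compress_C x).2).toNat := by
  unfold dynamic_compress_C
  by_cases h : x ≥ 64 <;> simp only [h, if_true, if_false]
  · have hc : min (x >>> (4 : Nat)) 15 = if x >>> (4 : Nat) > 15 then (15 : Int) else x >>> (4 : Nat) := by
      rw [min_def]; split_ifs <;> omega
    rw [hc]
    norm_num
    rfl
  · have hc : min (x >>> (2 : Nat)) 15 = if x >>> (2 : Nat) > 15 then (15 : Int) else x >>> (2 : Nat) := by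
      rw [min_def]; split_ifs <;> omega
    rw [hc]
    norm_num [Int.shiftLeft_eq]

-- A's fold accumulates the per-channel contributions
lemma foldA_sum (LUT : List Int) (m : Int) :
    ∀ (l : List (Int × Int × Int)) (E E2 : Int),
    l.foldl (fA LUT m) (E, E2)
      = (E + (l.map (fun (t : Int × Int × Int) => (t.1 - t.2.1) <<< (t.2.2 - m).toNat)).sum,
         E2 + (l.map (fun (t : Int × Int × Int) =>
            (LUT.getD (dynamic_compress_C |t.1 - t.2.1|).1.toNat 0
              <<< (4 * (dynamic_compress_C |t.1 - t.2.1|).2).toNat)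
            <<< (2 * (t.2.2 - m)).toNat)).sum) := by
  intro l
  induction l with
  | nil => intro E E2; simp
  | cons t l ih =>
    intro E E2
    simp only [List.foldl_cons, List.map_cons, List.sum_cons]
    rw [ih]
    unfold fA
    simp only [Prod.mk.injEq]
    constructor <;> ring

-- replacing the unique entry with key α adds F of the increment, for F additive in the value
lemma sum_map_replace (F : Int × (Int × Int) → Int)
    (hadd : ∀ α s s2 x y, F (α, (s + x, s2 + y)) = F (α, (s, s2)) + F (α, (x, y))) :
    ∀ (l : List (Int × (Int × Int))) (α : Int) (w : Int × Int) (x y : Int),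
    (l.map (·.1)).Nodup → (α, w) ∈ l →
    ((l.map (fun p => if p.1 == α then (α, (w.1 + x, w.2 + y)) else p)).map F).sum
      = (l.map F).sum + F (α, (x, y)) := by
  intro l
  induction l with
  | nil => intro α w x y _ h; simp at h
  | cons p l ih =>
    intro α w x y hnd hmem
    simp only [List.map_cons, List.nodup_cons, List.mem_map] at hnd
    by_cases hk : p.1 = α
    · -- the head is the (unique) entry with key α, so p = (α, w)
      have hpw : p = (α, w) := by
        rcases List.mem_cons.1 hmem with h | h
        · exact h.symm
        · exact absurd ⟨(α, w), h, by simp [hk]⟩ hnd.1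
      have htail : l.map (fun p => if p.1 == α then (α, (w.1 + x, w.2 + y)) else p) = l := by
        conv_rhs => rw [← List.map_id l]
        apply List.map_congr_left
        intro q hq
        have : q.1 ≠ α := by
          intro he
          exact hnd.1 ⟨q, hq, by rw [he, hk]⟩
        simp [this]
      simp only [List.map_cons, hpw, List.sum_cons, htail]
      have : ((α, w).1 == α) = true := by simp
      rw [this]
      simp only [if_true]
      calc F (α, (w.1 + x, w.2 + y)) + (l.map F).sum
          = F (α, (w.1, w.2)) + F (α, (x, y)) + (l.map F).sum := by rw [hadd]
        _ = F (α, w) + (l.map F).sum + F (α, (x, y)) := by rw [show (α, (w.1, w.2)) = (α, w) by rfl]; ring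
    · have hmem' : (α, w) ∈ l := by
        rcases List.mem_cons.1 hmem with h | h
        · exact absurd (by rw [← h]) hk
        · exact h
      have : (p.1 == α) = false := by simp [hk]
      simp only [List.map_cons, this, Bool.false_eq_true, if_false, List.sum_cons]
      rw [ih α w x y hnd.2 hmem']
      ring

-- inserting key α with its looked-up value plus an increment adds F of the increment
lemma sum_items_insert (F : Int × (Int × Int) → Int)
    (hadd : ∀ α s s2 x y, F (α, (s + x, s2 + y)) = F (α, (s, s2)) + F (α, (x, y)))
    (h0 : ∀ α, F (α, ((0 : Int), (0 : Int))) = 0)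
    (d : PySem.Dict Int (Int × Int)) (hnd : d.keys.Nodup) (α : Int) (x y : Int) :
    (((d.insert α ((d.getD α (0, 0)).1 + x, (d.getD α (0, 0)).2 + y)).items).map F).sum
      = (d.items.map F).sum + F (α, (x, y)) := by
  by_cases hc : d.contains α = true
  · obtain ⟨w, hw⟩ : ∃ w, d.get? α = some w := by
      rw [PySem.Dict.contains_eq_isSome_get?] at hc
      exact Option.isSome_iff_exists.1 hc
    have hgd : d.getD α (0, 0) = w := PySem.Dict.getD_of_get?_eq_some _ _ hw
    have hmem : (α, w) ∈ d.items := PySem.Dict.mem_items_of_get?_eq_some _ hw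
    rw [PySem.Dict.items_insert_of_contains _ _ hc, hgd]
    have hnd' : (d.items.map (·.1)).Nodup := by
      simpa [PySem.Dict.keys] using hnd
    exact sum_map_replace F hadd d.items α w x y hnd' hmem
  · have hc' : d.contains α = false := by simpa using hc
    have hgd : d.getD α (0, 0) = (0, 0) := PySem.Dict.getD_of_not_contains _ _ hc'
    rw [PySem.Dict.items_insert_of_not_contains _ _ hc', hgd]
    simp only [List.map_append, List.sum_append, List.map_cons, List.map_nil, List.sum_cons,
      List.sum_nil]
    have : F (α, ((0 : Int) + x, (0 : Int) + y)) = F (α, (x, y)) := by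
      rw [hadd, h0]; ring
    simp only [this]
    ring

-- B's grouping fold: the F-sum over the dict grows by exactly the per-channel contributions
lemma foldB_sum (LUT : List Int) (F : Int × (Int × Int) → Int)
    (hadd : ∀ α s s2 x y, F (α, (s + x, s2 + y)) = F (α, (s, s2)) + F (α, (x, y)))
    (h0 : ∀ α, F (α, ((0 : Int), (0 : Int))) = 0) :
    ∀ (l : List (Int × Int × Int)) (d : PySem.Dict Int (Int × Int)), d.keys.Nodup →
    (((l.foldl (stepB LUT) d).items).map F).sum
      = (d.items.map F).sum + (l.map (fun (t : Int × Int × Int) => F (t.2.2, (t.1 - t.2.1, sqB LUT t)))).sum := by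
  intro l
  induction l with
  | nil => intro d _; simp
  | cons t l ih =>
    intro d hnd
    simp only [List.foldl_cons, List.map_cons, List.sum_cons]
    have hstep : stepB LUT d t
        = d.insert t.2.2 ((d.getD t.2.2 (0, 0)).1 + (t.1 - t.2.1),
                          (d.getD t.2.2 (0, 0)).2 + sqB LUT t) := rfl
    rw [ih (stepB LUT d t) (by rw [hstep]; exact PySem.Dict.nodup_keys_insert _ _ _ hnd),
        hstep, sum_items_insert F hadd h0 d hnd]
    ring

-- ===== VERDICT (by name: the statement is the Claim_ definition above) =====
theorem stage1_statistics_C_spec : Claim_equal_stage1_statistics_C := by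
  intro q z a LUT _hDom hPre
  obtain ⟨hz, ha, _hLUT⟩ := hPre
  unfold Spec_stage1_statistics_C
  set m := find_min_alpha_C a with hm
  -- A's loop as a fold over the zipped triples
  have hloopA : (List.range q.length).foldl (fun (s : Int × Int) (i : Nat) =>
        fA LUT m s (q.getD i 0, z.getD i 0, a.getD i 0)) (0, 0)
      = (q.zip (z.zip a)).foldl (fA LUT m) (0, 0) :=
    foldl_range_getD_zip (fA LUT m) q z a (0, 0) hz ha
  have h1 : stage1_statistics_C q z a LUT
      = (((q.zip (z.zip a)).foldl (fA LUT m) (0, 0)).1,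
         ((q.zip (z.zip a)).foldl (fA LUT m) (0, 0)).2, m) :=
    congrArg (fun p : Int × Int => (p.1, p.2, m)) hloopA
  -- B, with its min rewritten to A's and its fold body named
  have h2 : stage1_statistics_C_alt q z a LUT
      = ((((q.zip (z.zip a)).foldl (stepB LUT) PySem.Dict.empty).items.map
            (fun (p : Int × (Int × Int)) => p.2.1 <<< (p.1 - m).toNat)).sum,
         (((q.zip (z.zip a)).foldl (stepB LUT) PySem.Dict.empty).items.map
            (fun (p : Int × (Int × Int)) => p.2.2 <<< (2 * (p.1 - m)).toNat)).sum, m) := by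
    simp only [stage1_statistics_C_alt]
    rw [min_agree]
    exact rfl
  rw [h1, h2, foldA_sum]
  have hEx := foldB_sum LUT (fun (p : Int × (Int × Int)) => p.2.1 <<< (p.1 - m).toNat)
    (by intro α s s2 x y; simp [Int.shiftLeft_eq]; ring)
    (by intro α; simp)
    (q.zip (z.zip a)) PySem.Dict.empty (by simp)
  have hEx2 := foldB_sum LUT (fun (p : Int × (Int × Int)) => p.2.2 <<< (2 * (p.1 - m)).toNat)
    (by intro α s s2 x y; simp [Int.shiftLeft_eq]; ring)
    (by intro α; simp)
    (q.zip (z.zip a)) PySem.Dict.empty (by simp)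
  simp only [hEx, hEx2]
  simp only [Prod.mk.injEq]
  refine ⟨?_, ?_, trivial⟩
  · simp [PySem.Dict.empty]
  · have hempty : (List.map (fun (p : Int × (Int × Int)) => p.2.2 <<< (2 * (p.1 - m)).toNat)
        (PySem.Dict.empty : PySem.Dict Int (Int × Int)).items).sum = 0 := by
      simp [PySem.Dict.empty]
    have hmap : List.map (fun (t : Int × Int × Int) =>
          LUT.getD (dynamic_compress_C |t.1 - t.2.1|).1.toNat 0
            <<< (4 * (dynamic_compress_C |t.1 - t.2.1|).2).toNat
            <<< (2 * (t.2.2 - m)).toNat) (q.zip (z.zip a))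
        = List.map (fun (t : Int × Int × Int) => sqB LUT t <<< (2 * (t.2.2 - m)).toNat)
            (q.zip (z.zip a)) :=
      List.map_congr_left (fun t _ => by simp only [sqB]; rw [sq_agree])
    rw [hempty, hmap]
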